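-- pv_equiv track=rewrite | github.com/tudelft-cda-lab/SEQUENT | experiment_code/boxplot_baseline_comparison.py | compute_windows
-- ===== SOURCE A (Python) =====
-- def compute_windows(packet_data, timestamp_data):
--     window_packet_frequencies= []
--     for i in range(len(timestamp_data)):
--         window_packet_data = packet_data[i]
--         for j in range(i + 1, len(timestamp_data)):
--             if timestamp_data[j] - timestamp_data[i] <= 10:
--                 window_packet_data += packet_data[j]
--             else:
--                 break
--
--         window_packet_frequencies.append(window_packet_data)
--     return window_packet_frequencies
-- ===== SOURCE B (Python) =====
-- def compute_windows(packet_data, timestamp_data):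
--     n = len(timestamp_data)
--     prefix = [0]
--     for j in range(n):
--         prefix.append(prefix[-1] + packet_data[j])
--     stack = []  # indices j > i, nearest at the end; timestamps strictly decrease front-to-end
--     out = []
--     for i in range(n - 1, -1, -1):
--         t = timestamp_data[i] + 10
--         # binary search: elements with timestamp > t form a prefix of the stack; count them
--         lo, hi = 0, len(stack)
--         while lo < hi:
--             mid = (lo + hi) // 2
--             if timestamp_data[stack[mid]] > t:
--                 lo = mid + 1
--             else:
--                 hi = mid
--         end = stack[lo - 1] if lo > 0 else n
--         out.append(prefix[end] - prefix[i])
--         while stack and timestamp_data[stack[-1]] <= timestamp_data[i]: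
--             stack.pop()
--         stack.append(i)
--     out.reverse()
--     return out
-- ===== Notes on version B (the rewrite author's own statement) =====
-- stated objective: faster
-- what changed: A re-sums each window with a fresh inner scan; B builds prefix sums once and, sweeping indices right-to-left, maintains a monotonic stack of timestamp records queried by binary search for the window end, so each output is a single prefix-sum difference.
import Mathlib
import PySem

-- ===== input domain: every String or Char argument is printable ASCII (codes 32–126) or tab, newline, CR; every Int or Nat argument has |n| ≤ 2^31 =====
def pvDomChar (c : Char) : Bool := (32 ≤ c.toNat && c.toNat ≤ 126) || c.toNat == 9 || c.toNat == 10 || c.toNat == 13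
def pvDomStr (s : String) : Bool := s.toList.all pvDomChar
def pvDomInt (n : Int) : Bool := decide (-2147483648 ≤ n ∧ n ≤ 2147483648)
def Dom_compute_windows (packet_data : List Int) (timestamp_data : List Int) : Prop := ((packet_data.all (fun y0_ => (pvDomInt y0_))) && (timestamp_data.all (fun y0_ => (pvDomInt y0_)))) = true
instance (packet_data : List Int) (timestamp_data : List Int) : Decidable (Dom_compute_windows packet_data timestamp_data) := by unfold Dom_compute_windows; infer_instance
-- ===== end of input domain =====

-- B replaces A's per-index re-summation (O(n^2)) by prefix sums plus a monotonic stack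
-- queried by binary search (O(n log n)); equivalence of the return values is proved on Pre_.

-- ===== PORT A =====
-- inner 'for j in range(i+1, n)' with break; list indexing is getD (out-of-range, i.e.
-- IndexError, is excluded by Pre_)
def pvInnerA (packet ts : List Int) (ti : Int) (n : Nat) (j : Nat) (acc : Int) : Int :=
  if _h : j < n then
    if ts.getD j 0 - ti ≤ 10 then pvInnerA packet ts ti n (j + 1) (acc + packet.getD j 0)
    else acc
  else acc
termination_by n - j
decreasing_by omega

def compute_windows (packet_data : List Int) (timestamp_data : List Int) : List Int :=
  -- outer loop appending one window sum per i
  (List.range timestamp_data.length).map (fun i =>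
    pvInnerA packet_data timestamp_data (timestamp_data.getD i 0) timestamp_data.length
      (i + 1) (packet_data.getD i 0))

-- ===== PORT B =====
-- prefix: [0], then prefix.append(prefix[-1] + packet_data[j]) for j in range(n)
def pvBuildPrefix (packet : List Int) (n : Nat) : List Int :=
  (List.range n).foldl (fun p j => p ++ [p.getLast?.getD 0 + packet.getD j 0]) [0]

-- the 'while lo < hi' binary-search loop of Source B
def pvBsearch (ts : List Int) (stack : List Nat) (t : Int) (lo hi : Nat) : Nat :=
  if _h : lo < hi then
    let mid := (lo + hi) / 2
    if t < ts.getD (stack.getD mid 0) 0 then pvBsearch ts stack t (mid + 1) hi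
    else pvBsearch ts stack t lo mid
  else lo
termination_by hi - lo
decreasing_by all_goals omega

-- the 'while stack and timestamp_data[stack[-1]] <= timestamp_data[i]: stack.pop()' loop
-- (python stack top = list end)
def pvPopLoop (ts : List Int) (ti : Int) (s : List Nat) : List Nat :=
  if h : s = [] then s
  else if ts.getD (s.getLast h) 0 ≤ ti then pvPopLoop ts ti s.dropLast else s
termination_by s.length
decreasing_by simp [List.length_dropLast]; exact List.length_pos_iff.mpr h

-- the 'for i in range(n-1, -1, -1)' loop; out.append + final out.reverse()
def pvLoopB (ts pfx : List Int) (n : Nat) : Nat → List Nat → List Int → List Int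
  | 0, _stack, out => out
  | i + 1, stack, out =>
    let t := ts.getD i 0 + 10
    let lo := pvBsearch ts stack t 0 stack.length
    let e := if 0 < lo then stack.getD (lo - 1) 0 else n
    let val := pfx.getD e 0 - pfx.getD i 0
    let stack' := pvPopLoop ts (ts.getD i 0) stack ++ [i]
    pvLoopB ts pfx n i stack' (out ++ [val])

def compute_windows_alt (packet_data : List Int) (timestamp_data : List Int) : List Int :=
  let n := timestamp_data.length
  let pfx := pvBuildPrefix packet_data n
  (pvLoopB timestamp_data pfx n n [] []).reverse

-- ===== PRECONDITION & SPEC =====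
-- Pre_ excludes exactly the inputs where the Python A raises IndexError
-- (packet_data shorter than timestamp_data); A returns on every other input.
def Pre_compute_windows (packet_data : List Int) (timestamp_data : List Int) : Prop :=
  timestamp_data.length ≤ packet_data.length

instance (packet_data : List Int) (timestamp_data : List Int) : Decidable (Pre_compute_windows packet_data timestamp_data) := by unfold Pre_compute_windows; infer_instance

def pvWitness_compute_windows : List Int × List Int := ([1, 2, 3], [0, 5, 20])

def Spec_compute_windows (packet_data : List Int) (timestamp_data : List Int) (out : List Int) : Prop := out = compute_windows_alt packet_data timestamp_data
instance (packet_data : List Int) (timestamp_data : List Int) (out : List Int) : Decidable (Spec_compute_windows packet_data timestamp_data out) := by unfold Spec_compute_windows; infer_instance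

-- ===== CLAIM (what is proved, stated in full; the proofs are below) =====
def Claim_equal_compute_windows : Prop := ∀ (packet_data : List Int) (timestamp_data : List Int), Dom_compute_windows packet_data timestamp_data → Pre_compute_windows packet_data timestamp_data → Spec_compute_windows packet_data timestamp_data (compute_windows packet_data timestamp_data)

-- ===== LEMMAS AND PROOFS =====

-- sum of the first k packets
def pvS (packet : List Int) (k : Nat) : Int := (packet.take k).sum

-- first j in [a, n) with ts[j] > t, else n  (the window end)
def pvEnd (ts : List Int) (n : Nat) (t : Int) (a : Nat) : Nat :=
  if _h : a < n then (if t < ts.getD a 0 then a else pvEnd ts n t (a + 1)) else n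
termination_by n - a
decreasing_by omega

-- the stack contents before processing index a-1 (python stack reversed: head = python top)
def pvRecs (ts : List Int) (n : Nat) (a : Nat) : List Nat :=
  if _h : a < n then
    a :: (pvRecs ts n (a + 1)).dropWhile (fun j => ts.getD j 0 ≤ ts.getD a 0)
  else []
termination_by n - a
decreasing_by omega

theorem pvS_succ (packet : List Int) (k : Nat) : pvS packet (k + 1) = pvS packet k + packet.getD k 0 := by
  rcases Nat.lt_or_ge k packet.length with h | h
  · rw [pvS, pvS, List.take_add_one, List.sum_append, List.getD_eq_getElem?_getD,
        List.getElem?_eq_getElem h]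
    simp
  · simp [pvS, List.take_add_one, List.getD_eq_getElem?_getD, List.getElem?_eq_none_iff.mpr h]

theorem pvEnd_le (ts : List Int) (n : Nat) (t : Int) (a : Nat) : pvEnd ts n t a ≤ n := by
  fun_induction pvEnd ts n t a <;> omega

theorem pvInnerA_eq (packet ts : List Int) (ti : Int) (n : Nat) :
    ∀ (j : Nat) (acc : Int), j ≤ n →
      pvInnerA packet ts ti n j acc
        = acc + (pvS packet (pvEnd ts n (ti + 10) j) - pvS packet j) := by
  intro j acc
  fun_induction pvInnerA packet ts ti n j acc with
  | case1 j acc h hts ih =>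
    intro _
    rw [pvEnd, dif_pos h, if_neg (by omega), ih (by omega), pvS_succ]
    ring
  | case2 j acc h hts =>
    intro _
    rw [pvEnd, dif_pos h, if_pos (by omega)]
    ring
  | case3 j acc h =>
    intro hj
    have : j = n := by omega
    subst this
    rw [pvEnd, dif_neg h]
    ring

theorem pvBuildPrefix_eq (packet : List Int) (n : Nat) :
    pvBuildPrefix packet n = (List.range (n + 1)).map (pvS packet) := by
  induction n with
  | zero => simp [pvBuildPrefix, pvS, List.range_succ]
  | succ n ih =>
    rw [pvBuildPrefix, List.range_succ, List.foldl_append]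
    rw [show (List.range n).foldl (fun p j => p ++ [p.getLast?.getD 0 + packet.getD j 0]) [0]
          = pvBuildPrefix packet n from rfl, ih]
    rw [List.range_succ (n := n + 1), List.map_append]
    rw [List.range_succ (n := n), List.map_append]
    simp [pvS_succ]

theorem pvBuildPrefix_getD (packet : List Int) (n k : Nat) (hk : k ≤ n) :
    (pvBuildPrefix packet n).getD k 0 = pvS packet k := by
  rw [pvBuildPrefix_eq]
  simp [List.getD, Nat.lt_succ_of_le hk]

theorem pvDropWhile_gt (ts : List Int) (c : Int) :
    ∀ l : List Nat, List.Pairwise (fun x y => ts.getD x 0 < ts.getD y 0) l →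
      ∀ x ∈ l.dropWhile (fun j => ts.getD j 0 ≤ c), c < ts.getD x 0 := by
  intro l
  induction l with
  | nil => simp
  | cons y ys ih =>
    intro hp x hx
    rcases List.pairwise_cons.mp hp with ⟨hy, hys⟩
    by_cases hq : ts.getD y 0 ≤ c
    · rw [List.dropWhile_cons, if_pos (by simpa using hq)] at hx
      exact ih hys x hx
    · rw [List.dropWhile_cons, if_neg (by simpa using hq)] at hx
      rcases List.mem_cons.mp hx with rfl | hx
      · omega
      · have := hy x hx
        omega

theorem pvRecs_sorted (ts : List Int) (n : Nat) (a : Nat) :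
    List.Pairwise (fun x y => ts.getD x 0 < ts.getD y 0) (pvRecs ts n a) := by
  fun_induction pvRecs ts n a with
  | case1 a h ih =>
    refine List.pairwise_cons.mpr ⟨?_, ih.sublist (List.dropWhile_sublist _)⟩
    intro x hx
    exact pvDropWhile_gt ts _ _ ih x hx
  | case2 a h => simp

theorem pvFind_dropWhile (p q : Nat → Bool) (hpq : ∀ x, q x = true → p x = false) :
    ∀ l : List Nat, List.find? p (l.dropWhile q) = List.find? p l := by
  intro l
  induction l with
  | nil => simp
  | cons y ys ih =>
    by_cases hq : q y = true
    · rw [List.dropWhile_cons, if_pos hq, ih, List.find?_cons_of_neg (by simp [hpq y hq])]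
    · rw [List.dropWhile_cons, if_neg hq]

theorem pvRecs_find (ts : List Int) (n : Nat) (t : Int) :
    ∀ a, List.find? (fun j => decide (t < ts.getD j 0)) (pvRecs ts n a)
      = if pvEnd ts n t a < n then some (pvEnd ts n t a) else none := by
  intro a
  fun_induction pvRecs ts n a with
  | case1 a h ih =>
    rw [pvEnd, dif_pos h]
    by_cases hts : t < ts.getD a 0
    · rw [if_pos hts, List.find?_cons_of_pos (by simpa using hts), if_pos h]
    · rw [if_neg hts, List.find?_cons_of_neg (by simpa using hts)]
      rw [pvFind_dropWhile _ _ (fun x hx => by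
        simp only [decide_eq_true_eq] at hx
        simp only [decide_eq_false_iff_not, not_lt]
        omega)]
      rw [ih]
  | case2 a h =>
    rw [pvEnd, dif_neg h]
    simp

theorem pvBsearch_eq (ts : List Int) (stack : List Nat) (t : Int) (c : Nat)
    (hpred : ∀ idx, idx < stack.length → ((t < ts.getD (stack.getD idx 0) 0) ↔ idx < c)) :
    ∀ lo hi, lo ≤ c → c ≤ hi → hi ≤ stack.length → pvBsearch ts stack t lo hi = c := by
  intro lo hi
  fun_induction pvBsearch ts stack t lo hi with
  | case1 lo hi h mid hts ih =>
    intro hlo hhi hlen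
    have hm : mid < stack.length := by omega
    have := (hpred mid hm).mp hts
    exact ih (by omega) hhi hlen
  | case2 lo hi h mid hts ih =>
    intro hlo hhi hlen
    have hm : mid < stack.length := by omega
    have : ¬ mid < c := fun hcc => hts ((hpred mid hm).mpr hcc)
    exact ih hlo (by omega) (by omega)
  | case3 lo hi h =>
    intro hlo hhi hlen
    omega

theorem pvPopLoop_reverse (ts : List Int) (ti : Int) :
    ∀ l : List Nat, pvPopLoop ts ti l.reverse
      = (l.dropWhile (fun j => ts.getD j 0 ≤ ti)).reverse := by
  intro l
  induction l with
  | nil => rw [pvPopLoop]; simp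
  | cons x xs ih =>
    rw [List.reverse_cons, pvPopLoop]
    have hne : xs.reverse ++ [x] ≠ [] := by simp
    rw [dif_neg hne]
    rw [List.getLast_concat, List.dropLast_concat]
    by_cases hq : ts.getD x 0 ≤ ti
    · rw [if_pos hq, ih, List.dropWhile_cons, if_pos (by simpa using hq)]
    · rw [if_neg hq, List.dropWhile_cons, if_neg (by simpa using hq), List.reverse_cons]

-- the window end computed by B's binary search on the reversed stack equals pvEnd
theorem pvStep_end (ts : List Int) (n : Nat) (t : Int) (a : Nat) :
    (if 0 < pvBsearch ts (pvRecs ts n a).reverse t 0 (pvRecs ts n a).reverse.length then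
      (pvRecs ts n a).reverse.getD
        (pvBsearch ts (pvRecs ts n a).reverse t 0 (pvRecs ts n a).reverse.length - 1) 0
    else n) = pvEnd ts n t a := by
  have hsorted := pvRecs_sorted ts n a
  set S := pvRecs ts n a with hSdef
  set D := S.dropWhile (fun j => ts.getD j 0 ≤ t) with hDdef
  set T := S.takeWhile (fun j => ts.getD j 0 ≤ t) with hTdef
  have hTD : T ++ D = S := List.takeWhile_append_dropWhile
  have hD : ∀ x ∈ D, t < ts.getD x 0 := pvDropWhile_gt ts t S hsorted
  have hT : ∀ x ∈ T, ts.getD x 0 ≤ t := by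
    intro x hx
    have := List.mem_takeWhile_imp hx
    simpa using this
  have hrev : S.reverse = D.reverse ++ T.reverse := by
    rw [← hTD, List.reverse_append]
  have hlenrev : S.reverse.length = D.length + T.length := by
    rw [hrev]; simp
  have hpred : ∀ idx, idx < S.reverse.length →
      ((t < ts.getD (S.reverse.getD idx 0) 0) ↔ idx < D.length) := by
    intro idx hidx
    by_cases hlt : idx < D.length
    · have h1 : S.reverse.getD idx 0 = D.reverse.getD idx 0 := by
        rw [hrev]; exact List.getD_append _ _ _ _ (by simpa using hlt)
      have h2 : D.reverse.getD idx 0 ∈ D := by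
        rw [List.getD_eq_getElem _ _ (by simpa using hlt)]
        exact List.mem_reverse.mp (List.getElem_mem _)
      rw [h1]
      exact iff_of_true (hD _ h2) hlt
    · have hge : D.reverse.length ≤ idx := by simpa using Nat.le_of_not_lt hlt
      have h1 : S.reverse.getD idx 0 = T.reverse.getD (idx - D.length) 0 := by
        rw [hrev, List.getD_append_right _ _ _ _ hge]
        simp
      have hir : idx - D.length < T.reverse.length := by
        simp only [List.length_reverse]
        omega
      have h2 : T.reverse.getD (idx - D.length) 0 ∈ T := by
        rw [List.getD_eq_getElem _ _ hir]
        exact List.mem_reverse.mp (List.getElem_mem _)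
      have := hT _ h2
      rw [h1]
      exact iff_of_false (by omega) hlt
  have hbs : pvBsearch ts S.reverse t 0 S.reverse.length = D.length :=
    pvBsearch_eq ts S.reverse t D.length hpred 0 S.reverse.length
      (Nat.zero_le _) (by omega) le_rfl
  have hfind : List.find? (fun j => decide (t < ts.getD j 0)) D
      = if pvEnd ts n t a < n then some (pvEnd ts n t a) else none := by
    rw [hDdef, pvFind_dropWhile _ _ (fun x hx => by
      simp only [decide_eq_true_eq] at hx
      simp only [decide_eq_false_iff_not, not_lt]
      omega), hSdef]
    exact pvRecs_find ts n t a
  rw [hbs]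
  by_cases hc : 0 < D.length
  · obtain ⟨d0, rest, hD0⟩ : ∃ d0 rest, D = d0 :: rest := by
      rcases hDD : D with _ | ⟨d0, rest⟩
      · rw [hDD] at hc; simp at hc
      · exact ⟨d0, rest, rfl⟩
    have hpd0 : t < ts.getD d0 0 := hD d0 (by rw [hD0]; exact List.mem_cons_self)
    have hfd : List.find? (fun j => decide (t < ts.getD j 0)) D = some d0 := by
      rw [hD0]; exact List.find?_cons_of_pos (by simpa using hpd0)
    rw [hfd] at hfind
    have hlt : pvEnd ts n t a = d0 := by
      by_cases hh : pvEnd ts n t a < n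
      · rw [if_pos hh] at hfind
        exact (Option.some.injEq _ _ ▸ hfind.symm :)
      · rw [if_neg hh] at hfind; simp at hfind
    rw [if_pos hc]
    have hgd : S.reverse.getD (D.length - 1) 0 = d0 := by
      rw [hrev, List.getD_append _ _ _ _ (by simp; omega)]
      rw [List.getD_eq_getElem _ _ (by simp; omega)]
      rw [List.getElem_reverse]
      simp [hD0]
    rw [hgd, hlt]
  · rw [if_neg hc]
    have hDnil : D = [] := List.eq_nil_of_length_eq_zero (by omega)
    rw [hDnil, List.find?_nil] at hfind
    have hle := pvEnd_le ts n t a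
    by_cases hh : pvEnd ts n t a < n
    · rw [if_pos hh] at hfind; simp at hfind
    · omega

theorem pvLoopB_eq (packet ts : List Int) (n : Nat) :
    ∀ i, i ≤ n → ∀ out,
      pvLoopB ts (pvBuildPrefix packet n) n i ((pvRecs ts n i).reverse) out
        = out ++ (((List.range i).map (fun k =>
            pvS packet (pvEnd ts n (ts.getD k 0 + 10) (k + 1)) - pvS packet k)).reverse) := by
  intro i
  induction i with
  | zero => intro _ out; simp [pvLoopB]
  | succ i ih =>
    intro hi out
    have hin : i < n := by omega
    simp only [pvLoopB]
    rw [pvStep_end ts n (ts.getD i 0 + 10) (i + 1)]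
    rw [pvBuildPrefix_getD packet n _ (pvEnd_le ts n (ts.getD i 0 + 10) (i + 1))]
    rw [pvBuildPrefix_getD packet n i (by omega)]
    rw [pvPopLoop_reverse ts (ts.getD i 0) (pvRecs ts n (i + 1))]
    have hstk : ((pvRecs ts n (i + 1)).dropWhile
          (fun j => ts.getD j 0 ≤ ts.getD i 0)).reverse ++ [i] = (pvRecs ts n i).reverse := by
      conv_rhs => rw [pvRecs]; rw [dif_pos hin]
      rw [List.reverse_cons]
    rw [hstk]
    rw [ih (by omega) (out ++ [_])]
    rw [List.range_succ, List.map_append, List.reverse_append]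
    simp

theorem pvRecs_top (ts : List Int) (n : Nat) : pvRecs ts n n = [] := by
  rw [pvRecs, dif_neg (lt_irrefl n)]

-- ===== VERDICT (by name: the statement is the Claim_ definition above) =====
theorem compute_windows_spec : Claim_equal_compute_windows := by
  intro packet ts _dom _pre
  unfold Spec_compute_windows
  have hloop := pvLoopB_eq packet ts ts.length ts.length le_rfl []
  rw [pvRecs_top, List.reverse_nil] at hloop
  show compute_windows packet ts
      = (pvLoopB ts (pvBuildPrefix packet ts.length) ts.length ts.length [] []).reverse
  rw [hloop, List.nil_append, List.reverse_reverse]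
  unfold compute_windows
  apply List.map_congr_left
  intro i hi
  have hi' : i < ts.length := List.mem_range.mp hi
  rw [pvInnerA_eq packet ts (ts.getD i 0) ts.length (i + 1) _ (by omega), pvS_succ]
  ring
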